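-- pv_equiv track=rewrite | github.com/prashnts/miRmap | src/mirmap/seed.py | find_pairings
-- ===== SOURCE A (Python) =====
-- def is_gu_wobble(b1, b2):
--     """Check if 2 nts are a GU wobble if the first sequence was reverse complemented"""
--     if (b1 == 'C' and b2 == 'U') or (b1 == 'A' and b2 == 'G'):
--         return True
--     else:
--         return False
--
-- def find_pairings(target_subseq, mirna_seq, mirna_skip_start, mismatch_end):
--     pairing = []
--     # last_pairing is updated each time there is a match/GU ; we can return a pairing without mismatch at the end.
--     last_pairing = 0
--     nb_mismatches_except_gu_wobbles = 0
--     nb_gu_wobbles = 0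
--     pairing.extend([0] * mirna_skip_start)
--     for i in range(len(target_subseq)):
--         tb = target_subseq[i]
--         mb = mirna_seq[i + mirna_skip_start]
--         is_guw = is_gu_wobble(tb, mb)
--         if tb == mb or is_guw:
--             if is_guw:
--                 nb_gu_wobbles += 1
--             pairing.append(i + mirna_skip_start + 1)
--             last_pairing = i + mirna_skip_start
--         else:
--             nb_mismatches_except_gu_wobbles += 1
--             pairing.append(0)
--     if mismatch_end:
--         return nb_mismatches_except_gu_wobbles, nb_gu_wobbles, pairing
--     else:
--         return nb_mismatches_except_gu_wobbles, nb_gu_wobbles, pairing[:last_pairing + 1]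
-- ===== SOURCE B (Python) =====
-- def _wobble(tb, mb):
--     return (tb, mb) in (('C', 'U'), ('A', 'G'))
--
-- def find_pairings(target_subseq, mirna_seq, mirna_skip_start, mismatch_end):
--     skip = mirna_skip_start
--     aligned = [(target_subseq[i], mirna_seq[i + skip])
--                for i in range(len(target_subseq))]
--     nb_gu_wobbles = sum(1 for tb, mb in aligned if _wobble(tb, mb))
--     nb_mismatches_except_gu_wobbles = sum(
--         1 for tb, mb in aligned if tb != mb and not _wobble(tb, mb))
--     pairing = [0] * skip + [
--         skip + i + 1 if tb == mb or _wobble(tb, mb) else 0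
--         for i, (tb, mb) in enumerate(aligned)]
--     if mismatch_end:
--         return nb_mismatches_except_gu_wobbles, nb_gu_wobbles, pairing
--     matches = [i for i, (tb, mb) in enumerate(aligned) if tb == mb or _wobble(tb, mb)]
--     last = skip + matches[-1] if matches else 0
--     return nb_mismatches_except_gu_wobbles, nb_gu_wobbles, pairing[:last + 1]
-- ===== Notes on version B (the rewrite author's own statement) =====
-- stated objective: alternative
-- what changed: Replaces A's single fused index loop with incremental last_pairing/counter bookkeeping by a build-then-summarize decomposition: first build the aligned base-pair list, then compute the two counts by separate reduction passes, build the pairing list by one comprehension, and derive the truncation point from the list of match positions.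
import Mathlib
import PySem

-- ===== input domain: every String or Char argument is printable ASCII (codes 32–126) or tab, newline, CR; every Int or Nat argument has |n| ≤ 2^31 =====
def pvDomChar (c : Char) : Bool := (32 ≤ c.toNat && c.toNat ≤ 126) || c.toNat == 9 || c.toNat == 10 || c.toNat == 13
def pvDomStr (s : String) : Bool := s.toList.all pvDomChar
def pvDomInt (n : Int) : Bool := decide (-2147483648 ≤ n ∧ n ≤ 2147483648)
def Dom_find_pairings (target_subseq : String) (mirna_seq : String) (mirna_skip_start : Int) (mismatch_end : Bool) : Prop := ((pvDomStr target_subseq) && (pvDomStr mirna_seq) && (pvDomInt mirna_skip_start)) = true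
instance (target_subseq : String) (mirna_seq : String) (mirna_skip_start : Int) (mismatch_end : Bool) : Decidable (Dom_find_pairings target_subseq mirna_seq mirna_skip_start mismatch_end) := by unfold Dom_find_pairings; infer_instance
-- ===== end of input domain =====

-- B builds the aligned base-pair list first, then derives the two counts, the pairing list and
-- the truncation point by separate passes over it; A fuses everything into one indexed loop
-- with incremental last_pairing/counter bookkeeping. Objective: alternative decomposition.


-- ===== PORT A =====
def is_gu_wobble (b1 : Char) (b2 : Char) : Bool :=
  if (b1 = 'C' ∧ b2 = 'U') ∨ (b1 = 'A' ∧ b2 = 'G') then true else false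

-- the body of A's `for i in range(len(target_subseq))` loop; state = (pairing, last_pairing, nb_mismatches_except_gu_wobbles, nb_gu_wobbles)
def fpStepA (target_subseq : String) (mirna_seq : String) (mirna_skip_start : Int)
    (st : List Int × Int × Int × Int) (i : Int) : List Int × Int × Int × Int :=
  let tb := (PySem.Str.pyGet? target_subseq i).getD ' '
  let mb := (PySem.Str.pyGet? mirna_seq (i + mirna_skip_start)).getD ' '
  let is_guw := is_gu_wobble tb mb
  if tb = mb ∨ is_guw = true then
    (st.1 ++ [i + mirna_skip_start + 1], i + mirna_skip_start, st.2.2.1,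
      if is_guw then st.2.2.2 + 1 else st.2.2.2)
  else
    (st.1 ++ [0], st.2.1, st.2.2.1 + 1, st.2.2.2)

def find_pairings (target_subseq : String) (mirna_seq : String) (mirna_skip_start : Int) (mismatch_end : Bool) : Int × Int × List Int :=
  let pairing : List Int := List.replicate mirna_skip_start.toNat 0
  let st := (PySem.List.pyRange 0 (target_subseq.toList.length : Int) 1).foldl
    (fpStepA target_subseq mirna_seq mirna_skip_start) (pairing, 0, 0, 0)
  if mismatch_end then
    (st.2.2.1, st.2.2.2, st.1)
  else
    (st.2.2.1, st.2.2.2, PySem.List.slice st.1 none (some (st.2.1 + 1)))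

-- ===== PORT B =====
def fp_wobble (tb : Char) (mb : Char) : Bool :=
  ((tb, mb) == ('C', 'U')) || ((tb, mb) == ('A', 'G'))

def find_pairings_alt (target_subseq : String) (mirna_seq : String) (mirna_skip_start : Int) (mismatch_end : Bool) : Int × Int × List Int :=
  let skip := mirna_skip_start
  let aligned := (PySem.List.pyRange 0 (target_subseq.toList.length : Int) 1).map
    (fun i => ((PySem.Str.pyGet? target_subseq i).getD ' ',
               (PySem.Str.pyGet? mirna_seq (i + skip)).getD ' '))
  let nb_gu_wobbles : Int := aligned.countP (fun p => fp_wobble p.1 p.2)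
  let nb_mismatches : Int := aligned.countP (fun p => p.1 != p.2 && !fp_wobble p.1 p.2)
  let pairing : List Int := List.replicate skip.toNat 0 ++
    (PySem.List.enumerate aligned).map
      (fun p => if (p.2.1 == p.2.2) || fp_wobble p.2.1 p.2.2 then skip + p.1 + 1 else 0)
  if mismatch_end then
    (nb_mismatches, nb_gu_wobbles, pairing)
  else
    let matchs := ((PySem.List.enumerate aligned).filter
      (fun p => (p.2.1 == p.2.2) || fp_wobble p.2.1 p.2.2)).map (fun p => p.1)
    let last : Int := if matchs ≠ [] then skip + PySem.List.pyGetD matchs (-1) 0 else 0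
    (nb_mismatches, nb_gu_wobbles, PySem.List.slice pairing none (some (last + 1)))

-- ===== PRECONDITION & SPEC =====
-- Pre_ excludes exactly the inputs on which A raises IndexError: a nonempty target whose
-- alignment indices i+mirna_skip_start run off mirna_seq (below -len or at/past len).
def Pre_find_pairings (target_subseq : String) (mirna_seq : String) (mirna_skip_start : Int) (mismatch_end : Bool) : Prop :=
  (target_subseq.toList.length : Int) = 0 ∨
  (-(mirna_seq.toList.length : Int) ≤ mirna_skip_start ∧
   mirna_skip_start + (target_subseq.toList.length : Int) ≤ (mirna_seq.toList.length : Int))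
instance (target_subseq : String) (mirna_seq : String) (mirna_skip_start : Int) (mismatch_end : Bool) : Decidable (Pre_find_pairings target_subseq mirna_seq mirna_skip_start mismatch_end) := by unfold Pre_find_pairings; infer_instance

def pvWitness_find_pairings : String × String × Int × Bool := ("GCA", "UGCAU", 1, false)

def Spec_find_pairings (target_subseq : String) (mirna_seq : String) (mirna_skip_start : Int) (mismatch_end : Bool) (out : Int × Int × List Int) : Prop := out = find_pairings_alt target_subseq mirna_seq mirna_skip_start mismatch_end
instance (target_subseq : String) (mirna_seq : String) (mirna_skip_start : Int) (mismatch_end : Bool) (out : Int × Int × List Int) : Decidable (Spec_find_pairings target_subseq mirna_seq mirna_skip_start mismatch_end out) := by unfold Spec_find_pairings; infer_instance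

-- ===== CLAIM (what is proved, stated in full; the proofs are below) =====
def Claim_equal_find_pairings : Prop := ∀ (target_subseq : String) (mirna_seq : String) (mirna_skip_start : Int) (mismatch_end : Bool), Dom_find_pairings target_subseq mirna_seq mirna_skip_start mismatch_end → Pre_find_pairings target_subseq mirna_seq mirna_skip_start mismatch_end → Spec_find_pairings target_subseq mirna_seq mirna_skip_start mismatch_end (find_pairings target_subseq mirna_seq mirna_skip_start mismatch_end)

-- ===== LEMMAS AND PROOFS =====

-- the two bases aligned at position i (Python indexing, with a default off the ends), and the
-- match-or-wobble predicate
def fpTB (t : String) (i : Nat) : Char := (PySem.Str.pyGet? t (i : Int)).getD ' '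
def fpMB (m : String) (skip : Int) (i : Nat) : Char := (PySem.Str.pyGet? m ((i : Int) + skip)).getD ' '
def fpOk (t m : String) (skip : Int) (i : Nat) : Bool :=
  (fpTB t i == fpMB m skip i) || is_gu_wobble (fpTB t i) (fpMB m skip i)

-- reference values of A's loop state after n iterations
def fpPair (t m : String) (skip : Int) (n : Nat) : List Int :=
  (List.range n).map (fun i => if fpOk t m skip i then (i : Int) + skip + 1 else 0)
def fpLast (t m : String) (skip : Int) (n : Nat) : Int :=
  (List.range n).foldl (fun acc i => if fpOk t m skip i then (i : Int) + skip else acc) 0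
def fpMM (t m : String) (skip : Int) (n : Nat) : Int :=
  ((List.range n).countP (fun i => !fpOk t m skip i) : Int)
def fpGU (t m : String) (skip : Int) (n : Nat) : Int :=
  ((List.range n).countP (fun i => is_gu_wobble (fpTB t i) (fpMB m skip i)) : Int)

theorem fp_wobble_eq (tb mb : Char) : fp_wobble tb mb = is_gu_wobble tb mb := by
  simp [fp_wobble, is_gu_wobble, BEq.beq]

theorem loopA_spec (t m : String) (skip : Int) (n : Nat) :
    (PySem.List.pyRange 0 (n : Int) 1).foldl (fpStepA t m skip)
      (List.replicate skip.toNat 0, 0, 0, 0)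
    = (List.replicate skip.toNat (0 : Int) ++ fpPair t m skip n,
       fpLast t m skip n, fpMM t m skip n, fpGU t m skip n) := by
  induction n with
  | zero =>
    rw [PySem.List.pyRange_one_eq_nil (by omega)]
    simp [fpPair, fpLast, fpMM, fpGU]
  | succ n ih =>
    have hcast : ((n + 1 : Nat) : Int) = (n : Int) + 1 := by push_cast; ring
    rw [hcast, PySem.List.pyRange_one_succ_right (by omega), List.foldl_append, ih]
    simp only [List.foldl_cons, List.foldl_nil]
    have htb : (PySem.Str.pyGet? t (n : Int)).getD ' ' = fpTB t n := rfl
    have hmb : (PySem.Str.pyGet? m ((n : Int) + skip)).getD ' ' = fpMB m skip n := rfl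
    rw [fpStepA]
    simp only [htb, hmb]
    by_cases hok : fpOk t m skip n = true
    · rw [if_pos (by simpa [fpOk, beq_iff_eq] using hok)]
      refine Prod.ext ?_ (Prod.ext ?_ (Prod.ext ?_ ?_))
      · simp [fpPair, List.range_succ, hok]
      · simp [fpLast, List.range_succ, hok]
      · simp [fpMM, List.range_succ, hok]
      · simp [fpGU, List.range_succ]
        by_cases hw : is_gu_wobble (fpTB t n) (fpMB m skip n) = true <;> simp [hw]
    · rw [if_neg (by simpa [fpOk, beq_iff_eq, not_or] using hok)]
      have hw : is_gu_wobble (fpTB t n) (fpMB m skip n) = false := by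
        revert hok; simp [fpOk]
      refine Prod.ext ?_ (Prod.ext ?_ (Prod.ext ?_ ?_))
      · simp [fpPair, List.range_succ, hok]
      · simp [fpLast, List.range_succ, hok]
      · simp [fpMM, List.range_succ, hok]
      · simp [fpGU, List.range_succ, hw]

-- generic bridge: enumerate as a map over range
theorem enumerate_eq_range {α : Type} (xs : List α) (d : α) : ∀ k : Nat,
    PySem.List.enumerate xs (k : Int)
    = (List.range xs.length).map (fun i => (((k + i : Nat) : Int), xs.getD i d)) := by
  induction xs with
  | nil => intro k; simp [PySem.List.enumerate_nil]
  | cons x xs ih =>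
    intro k
    rw [PySem.List.enumerate_cons]
    have h1 : ((k : Int) + 1) = ((k + 1 : Nat) : Int) := by push_cast; ring
    rw [h1, ih (k + 1)]
    simp [List.range_succ_eq_map, List.map_map, Function.comp_def]
    intro a _
    ring

-- B's aligned list is the range-indexed map of the aligned base pairs
theorem aligned_eq (t m : String) (skip : Int) :
    (PySem.List.pyRange 0 (t.toList.length : Int) 1).map
      (fun i => ((PySem.Str.pyGet? t i).getD ' ', (PySem.Str.pyGet? m (i + skip)).getD ' '))
    = (List.range t.toList.length).map (fun i => (fpTB t i, fpMB m skip i)) := by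
  rw [PySem.List.pyRange_one]
  simp only [Int.sub_zero, Int.toNat_natCast, List.map_map]
  apply List.map_congr_left
  intro i _
  simp [fpTB, fpMB]

-- A's last_pairing is the last match position shifted by skip (default 0)
theorem foldl_last_filter (ok : Nat → Bool) (skip : Int) (l : List Nat) (a : Int) :
    l.foldl (fun acc i => if ok i then (i : Int) + skip else acc) a
    = (((l.filter ok).map (fun (j : Nat) => (j : Int) + skip)).getLast?).getD a := by
  induction l using List.reverseRecOn generalizing a with
  | nil => rfl
  | append_singleton l x ih =>
    rw [List.foldl_append, List.foldl_cons, List.foldl_nil, List.filter_append]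
    by_cases hx : ok x = true
    · simp [hx]
    · simp [hx, ih]

-- ===== VERDICT (by name: the statement is the Claim_ definition above) =====
theorem find_pairings_spec : Claim_equal_find_pairings := by
  intro t m skip me hdom hpre
  unfold Spec_find_pairings
  set n := t.toList.length with hn
  have hA : find_pairings t m skip me =
      (fpMM t m skip n, fpGU t m skip n,
       if me then List.replicate skip.toNat (0 : Int) ++ fpPair t m skip n
       else PySem.List.slice (List.replicate skip.toNat (0 : Int) ++ fpPair t m skip n) none
         (some (fpLast t m skip n + 1))) := by
    rw [find_pairings]
    simp only [← hn]
    rw [loopA_spec t m skip n]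
    cases me <;> simp
  set ali := (List.range n).map (fun i => (fpTB t i, fpMB m skip i)) with hali
  have halilen : ali.length = n := by simp [hali]
  have haliget : ∀ i < n, ali.getD i (' ', ' ') = (fpTB t i, fpMB m skip i) := by
    intro i hi
    simp [hali, List.getD_eq_getElem?_getD, hi]
  have hgu : (ali.countP (fun p => fp_wobble p.1 p.2) : Int) = fpGU t m skip n := by
    rw [hali, List.countP_map, fpGU]
    congr 1
    apply List.countP_congr
    intro i _
    simp [fp_wobble_eq]
  have hmm : (ali.countP (fun p => p.1 != p.2 && !fp_wobble p.1 p.2) : Int) = fpMM t m skip n := by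
    rw [hali, List.countP_map, fpMM]
    congr 1
    apply List.countP_congr
    intro i _
    simp [fpOk, fp_wobble_eq, Bool.not_or]
  have hpb : (PySem.List.enumerate ali).map
      (fun p => if (p.2.1 == p.2.2) || fp_wobble p.2.1 p.2.2 then skip + p.1 + 1 else 0)
      = fpPair t m skip n := by
    have he := enumerate_eq_range ali (' ', ' ') 0
    simp only [Nat.cast_zero, Nat.zero_add] at he
    rw [he, List.map_map, halilen, fpPair]
    apply List.map_congr_left
    intro i hi
    simp only [List.mem_range] at hi
    simp only [Function.comp_def, haliget i hi]
    rw [fp_wobble_eq]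
    by_cases hok : fpOk t m skip i = true
    · rw [if_pos (by simpa [fpOk] using hok), if_pos hok]
      ring
    · rw [if_neg (by simpa [fpOk] using hok), if_neg hok]
  have hmt : ((PySem.List.enumerate ali).filter
        (fun p => (p.2.1 == p.2.2) || fp_wobble p.2.1 p.2.2)).map (fun p => p.1)
      = ((List.range n).filter (fpOk t m skip)).map (fun (i : Nat) => (i : Int)) := by
    have he := enumerate_eq_range ali (' ', ' ') 0
    simp only [Nat.cast_zero, Nat.zero_add] at he
    rw [he, halilen, List.filter_map, List.map_map]
    congr 1
    apply List.filter_congr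
    intro i hi
    simp only [List.mem_range] at hi
    simp only [Function.comp_def, haliget i hi, fp_wobble_eq]
    rfl
  have hlast : (if (((List.range n).filter (fpOk t m skip)).map (fun (i : Nat) => (i : Int))) ≠ []
        then skip + PySem.List.pyGetD
          ((((List.range n).filter (fpOk t m skip)).map (fun (i : Nat) => (i : Int)))) (-1) 0
        else 0) = fpLast t m skip n := by
    rw [fpLast, foldl_last_filter]
    by_cases hemp : ((List.range n).filter (fpOk t m skip)) = []
    · simp [hemp]
    · have hne : (((List.range n).filter (fpOk t m skip)).map (fun (i : Nat) => (i : Int))) ≠ [] := by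
        simpa using hemp
      have hFne : (((List.range n).filter (fpOk t m skip)).map (fun (j : Nat) => (j : Int) + skip)) ≠ [] := by
        simpa using hemp
      rw [if_pos hne, PySem.List.pyGetD_neg_one _ _ hne,
        List.getLast?_eq_some_getLast hFne, Option.getD_some, List.getLast_map, List.getLast_map]
      ring
  have hB : find_pairings_alt t m skip me =
      (fpMM t m skip n, fpGU t m skip n,
       if me then List.replicate skip.toNat (0 : Int) ++ fpPair t m skip n
       else PySem.List.slice (List.replicate skip.toNat (0 : Int) ++ fpPair t m skip n) none
         (some (fpLast t m skip n + 1))) := by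
    rw [find_pairings_alt]
    simp only [aligned_eq t m skip]
    simp only [← hn, ← hali, hgu, hmm, hpb, hmt]
    cases me
    · simp only [Bool.false_eq_true, if_false]
      rw [hlast]
    · simp
  rw [hA, hB]
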